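-- pv_equiv track=rewrite | github.com/Auratyme/auratyme | backend/microservices/schedules-ai/core/src/core/scheduler/blocks.py | _find_best_available_gap
-- ===== SOURCE A (Python) =====
-- def _extract_gaps_in_range(blocks, range_start: int, range_end: int) -> list:
--     """
--     Extracts all available gaps within time range.
--
--     Educational Note:
--         Identifies free time slots between fixed blocks
--         where lunch could potentially be placed.
--     """
--     sorted_blocks = sorted(
--         [(s, e) for s, e, m in blocks if s < range_end and e > range_start],
--         key=lambda x: x[0]
--     )
--
--     gaps = []
--     current_time = range_start
--
--     for block_start, block_end in sorted_blocks:
--         if block_start > current_time: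
--             gaps.append((current_time, block_start))
--         current_time = max(current_time, block_end)
--
--     if current_time < range_end:
--         gaps.append((current_time, range_end))
--
--     return gaps
--
-- def _find_best_available_gap(blocks, duration: int) -> int:
--     """
--     Finds best available gap anywhere in day (fallback).
--
--     Educational Note:
--         PRIORITY 3: Last resort - finds any suitable gap
--         preferring slots closest to biological noon (12:00).
--         Always returns valid time (lunch never skipped).
--     """
--     gaps = _extract_gaps_in_range(blocks, 6 * 60, 22 * 60)
--     suitable_gaps = [(s, e) for s, e in gaps if (e - s) >= duration]
--
--     if suitable_gaps:
--         noon = 12 * 60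
--         closest_gap = min(
--             suitable_gaps,
--             key=lambda g: abs((g[0] + g[1]) // 2 - noon)
--         )
--         return closest_gap[0]
--
--     return 12 * 60
-- ===== SOURCE B (Python) =====
-- def _find_best_available_gap(blocks, duration: int) -> int:
--     """Single-sweep re-implementation: one pass over the sorted in-range blocks
--     maintaining the running end of occupied time and the best gap seen so far."""
--     range_start, range_end, noon = 6 * 60, 22 * 60, 12 * 60
--     current = range_start
--     best_dist = None
--     best_start = None
--     for s, e in sorted(
--         [(b[0], b[1]) for b in blocks if b[0] < range_end and b[1] > range_start],
--         key=lambda t: t[0],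
--     ):
--         if s > current and s - current >= duration:
--             d = abs((current + s) // 2 - noon)
--             if best_dist is None or d < best_dist:
--                 best_dist, best_start = d, current
--         if e > current:
--             current = e
--     if current < range_end and range_end - current >= duration:
--         d = abs((current + range_end) // 2 - noon)
--         if best_dist is None or d < best_dist:
--             best_dist, best_start = d, current
--     return best_start if best_start is not None else noon
-- ===== Notes on version B (the rewrite author's own statement) =====
-- stated objective: alternative
-- what changed: Replaced A's three-pass pipeline (build a gaps list, filter it for suitable width, then min-by-distance-to-noon) with one sweep over the sorted in-range blocks that maintains current occupied end plus the best (distance, start) seen, using strict-< updates to reproduce min's first-wins tie-break; no intermediate gap list is materialised.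
import Mathlib
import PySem

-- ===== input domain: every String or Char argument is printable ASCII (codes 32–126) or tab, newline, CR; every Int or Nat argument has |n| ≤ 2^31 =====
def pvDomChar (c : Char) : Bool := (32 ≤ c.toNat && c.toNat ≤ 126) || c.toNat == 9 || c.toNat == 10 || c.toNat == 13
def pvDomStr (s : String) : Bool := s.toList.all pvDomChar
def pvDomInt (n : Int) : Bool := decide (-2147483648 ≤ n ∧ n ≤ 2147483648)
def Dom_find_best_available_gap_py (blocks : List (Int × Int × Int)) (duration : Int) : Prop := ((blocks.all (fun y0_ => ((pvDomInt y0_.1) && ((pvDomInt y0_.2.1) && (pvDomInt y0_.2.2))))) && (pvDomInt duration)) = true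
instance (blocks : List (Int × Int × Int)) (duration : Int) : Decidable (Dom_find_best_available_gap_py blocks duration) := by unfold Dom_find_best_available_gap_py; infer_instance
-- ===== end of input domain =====

-- B collapses A's build-gaps / filter / min-by-key pipeline into one sweep keeping the running
-- occupied end and the best (distance-to-noon, start) pair; same return value, no gap list built.

-- ===== PORT A =====
-- Python max(a, b) / abs(n) on ints, ported explicitly (exact: first-maximal on ties)
def pymax (a b : Int) : Int := if a < b then b else a
def pyabs (n : Int) : Int := if n < 0 then -n else n
-- port of _extract_gaps_in_range
def extract_gaps_in_range (blocks : List (Int × Int × Int)) (range_start range_end : Int) : List (Int × Int) :=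
  let sorted_blocks := PySem.List.sorted
    ((blocks.filter (fun b => decide (b.1 < range_end) && decide (b.2.1 > range_start))).map
      (fun b => (b.1, b.2.1)))
    (fun x => x.1)
  let st := sorted_blocks.foldl
    (fun (st : Int × List (Int × Int)) be =>
      (pymax st.1 be.2, if be.1 > st.1 then st.2 ++ [(st.1, be.1)] else st.2))
    (range_start, [])
  if st.1 < range_end then st.2 ++ [(st.1, range_end)] else st.2

def find_best_available_gap_py (blocks : List (Int × Int × Int)) (duration : Int) : Int :=
  let gaps := extract_gaps_in_range blocks (6 * 60) (22 * 60)
  let suitable_gaps := gaps.filter (fun g => decide (g.2 - g.1 ≥ duration))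
  if suitable_gaps.isEmpty then 12 * 60
  else
    match PySem.List.min? suitable_gaps
        (fun g => pyabs (PySem.Int.floordiv (g.1 + g.2) 2 - 12 * 60)) with
    | some g => g.1
    | none => 12 * 60

-- ===== PORT B =====
def find_best_available_gap_py_alt (blocks : List (Int × Int × Int)) (duration : Int) : Int :=
  let st := (PySem.List.sorted
      ((blocks.filter (fun b => decide (b.1 < 22 * 60) && decide (b.2.1 > 6 * 60))).map
        (fun b => (b.1, b.2.1)))
      (fun t => t.1)).foldl
    (fun (st : Int × Option (Int × Int)) se =>
      let best :=
        if se.1 > st.1 ∧ se.1 - st.1 ≥ duration then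
          let d := pyabs (PySem.Int.floordiv (st.1 + se.1) 2 - 12 * 60)
          match st.2 with
          | none => some (d, st.1)
          | some b => if d < b.1 then some (d, st.1) else some b
        else st.2
      (if se.2 > st.1 then se.2 else st.1, best))
    (6 * 60, none)
  let best :=
    if st.1 < 22 * 60 ∧ 22 * 60 - st.1 ≥ duration then
      let d := pyabs (PySem.Int.floordiv (st.1 + 22 * 60) 2 - 12 * 60)
      match st.2 with
      | none => some (d, st.1)
      | some b => if d < b.1 then some (d, st.1) else some b
    else st.2
  match best with
  | some b => b.2
  | none => 12 * 60

-- ===== PRECONDITION & SPEC =====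
def Spec_find_best_available_gap_py (blocks : List (Int × Int × Int)) (duration : Int) (out : Int) : Prop := out = find_best_available_gap_py_alt blocks duration
instance (blocks : List (Int × Int × Int)) (duration : Int) (out : Int) : Decidable (Spec_find_best_available_gap_py blocks duration out) := by unfold Spec_find_best_available_gap_py; infer_instance

-- ===== CLAIM (what is proved, stated in full; the proofs are below) =====
def Claim_equal_find_best_available_gap_py : Prop := ∀ (blocks : List (Int × Int × Int)) (duration : Int), Dom_find_best_available_gap_py blocks duration → Spec_find_best_available_gap_py blocks duration (find_best_available_gap_py blocks duration)

-- ===== LEMMAS AND PROOFS =====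

-- distance-to-noon key of a gap
def pvKey (g : Int × Int) : Int := pyabs (PySem.Int.floordiv (g.1 + g.2) 2 - 12 * 60)

-- final occupied time after sweeping the blocks
def pvCT (cur : Int) : List (Int × Int) → Int
  | [] => cur
  | se :: l => pvCT (pymax cur se.2) l

-- the gaps A's loop emits
def pvG (cur : Int) : List (Int × Int) → List (Int × Int)
  | [] => []
  | se :: l => (if se.1 > cur then [(cur, se.1)] else []) ++ pvG (pymax cur se.2) l

-- B's best-update step, on an already-formed gap
def pvMStep (b : Option (Int × Int)) (g : Int × Int) : Option (Int × Int) :=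
  match b with
  | none => some (pvKey g, g.1)
  | some p => if pvKey g < p.1 then some (pvKey g, g.1) else some p

-- min?'s fold step
def pvMinStep (acc : Option (Int × Int)) (g : Int × Int) : Option (Int × Int) :=
  match acc with
  | none => some g
  | some m => if pvKey g < pvKey m then some g else some m

lemma pvA_fold (l : List (Int × Int)) : ∀ (cur : Int) (gs : List (Int × Int)),
    l.foldl (fun (st : Int × List (Int × Int)) be =>
      (pymax st.1 be.2, if be.1 > st.1 then st.2 ++ [(st.1, be.1)] else st.2)) (cur, gs)
      = (pvCT cur l, gs ++ pvG cur l) := by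
  induction l with
  | nil => intro cur gs; simp [pvCT, pvG]
  | cons se l ih =>
      intro cur gs
      simp only [List.foldl_cons, pvCT, pvG, ih]
      by_cases h : se.1 > cur <;> simp [h]

lemma pvB_fold (duration : Int) (l : List (Int × Int)) :
    ∀ (cur : Int) (b : Option (Int × Int)),
    l.foldl (fun (st : Int × Option (Int × Int)) se =>
      let best :=
        if se.1 > st.1 ∧ se.1 - st.1 ≥ duration then
          let d := pyabs (PySem.Int.floordiv (st.1 + se.1) 2 - 12 * 60)
          match st.2 with
          | none => some (d, st.1)
          | some b => if d < b.1 then some (d, st.1) else some b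
        else st.2
      (if se.2 > st.1 then se.2 else st.1, best)) (cur, b)
      = (pvCT cur l,
         ((pvG cur l).filter (fun g => decide (g.2 - g.1 ≥ duration))).foldl pvMStep b) := by
  induction l with
  | nil => intro cur b; simp [pvCT, pvG]
  | cons se l ih =>
      intro cur b
      simp only [List.foldl_cons, pvCT, pvG, ih]
      have hmax : (if se.2 > cur then se.2 else cur) = pymax cur se.2 := rfl
      rw [hmax]
      by_cases h1 : se.1 > cur
      · by_cases h2 : se.1 - cur ≥ duration
        · simp [h1, h2, pvMStep, pvKey]
        · simp [h1, h2]
      · simp [h1]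

lemma pvMap_fold (l : List (Int × Int)) : ∀ (acc : Option (Int × Int)),
    l.foldl pvMStep (acc.map (fun g => (pvKey g, g.1)))
      = (l.foldl pvMinStep acc).map (fun g => (pvKey g, g.1)) := by
  induction l with
  | nil => intro acc; rfl
  | cons g l ih =>
      intro acc
      simp only [List.foldl_cons]
      rw [← ih]
      congr 1
      cases acc with
      | none => rfl
      | some m =>
          simp [pvMStep, pvMinStep]
          by_cases h : pvKey g < pvKey m <;> simp [h]

lemma pvMin_eq_fold (l : List (Int × Int)) :
    PySem.List.min? l pvKey = l.foldl pvMinStep none := by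
  unfold PySem.List.min?
  congr 1
  funext acc g
  cases acc <;> rfl

def pvSuit (duration ct : Int) (G : List (Int × Int)) : List (Int × Int) :=
  (if ct < 22 * 60 then G ++ [(ct, 22 * 60)] else G).filter (fun g => decide (g.2 - g.1 ≥ duration))

lemma pvTrail (duration ct : Int) (G : List (Int × Int)) :
    (if ct < 22 * 60 ∧ 22 * 60 - ct ≥ duration then
        match (G.filter (fun g => decide (g.2 - g.1 ≥ duration))).foldl pvMStep none with
        | none => some (pyabs (PySem.Int.floordiv (ct + 22 * 60) 2 - 12 * 60), ct)
        | some b => if pyabs (PySem.Int.floordiv (ct + 22 * 60) 2 - 12 * 60) < b.1 then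
            some (pyabs (PySem.Int.floordiv (ct + 22 * 60) 2 - 12 * 60), ct) else some b
      else (G.filter (fun g => decide (g.2 - g.1 ≥ duration))).foldl pvMStep none)
    = (pvSuit duration ct G).foldl pvMStep none := by
  unfold pvSuit
  by_cases hct : ct < 22 * 60
  · by_cases hd : 22 * 60 - ct ≥ duration
    · have hct' : ct < 1320 := by omega
      have hd' : duration ≤ 1320 - ct := by omega
      cases hb : (G.filter (fun g => decide (g.2 - g.1 ≥ duration))).foldl pvMStep none with
      | none => simp [hct', hd', hb, pvMStep, pvKey, List.filter_append]
      | some b => simp [hct', hd', hb, pvMStep, pvKey, List.filter_append]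
    · have hct' : ct < 1320 := by omega
      have hd' : ¬ (duration ≤ 1320 - ct) := by omega
      simp [hct', hd', List.filter_append]
  · have hct' : ¬ (ct < 1320) := by omega
    simp [hct']

lemma pvMatch (L : List (Int × Int)) :
    (if L.isEmpty then 12 * 60
     else match PySem.List.min? L pvKey with | some g => g.1 | none => 12 * 60)
    = (match L.foldl pvMStep none with | some b => b.2 | none => (12 * 60 : Int)) := by
  have h : L.foldl pvMStep none = (PySem.List.min? L pvKey).map (fun g => (pvKey g, g.1)) := by
    rw [pvMin_eq_fold]
    simpa using pvMap_fold L none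
  rw [h]
  cases hL : PySem.List.min? L pvKey with
  | none =>
      have hnil : L = [] := (PySem.List.min?_eq_none_iff L pvKey).mp hL
      simp [hnil]
  | some g =>
      have hne : L ≠ [] := by
        intro h0
        rw [h0] at hL
        rw [show PySem.List.min? ([] : List (Int × Int)) pvKey = none from rfl] at hL
        cases hL
      simp [List.isEmpty_iff, hne]

lemma pvFinal (duration ct : Int) (G : List (Int × Int)) :
    (if ((if ct < 22 * 60 then G ++ [(ct, 22 * 60)] else G).filter
          (fun g => decide (g.2 - g.1 ≥ duration))).isEmpty then 12 * 60
     else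
       match PySem.List.min?
           ((if ct < 22 * 60 then G ++ [(ct, 22 * 60)] else G).filter
             (fun g => decide (g.2 - g.1 ≥ duration))) pvKey with
       | some g => g.1
       | none => 12 * 60)
    = (match
        (if ct < 22 * 60 ∧ 22 * 60 - ct ≥ duration then
          match (G.filter (fun g => decide (g.2 - g.1 ≥ duration))).foldl pvMStep none with
          | none => some (pyabs (PySem.Int.floordiv (ct + 22 * 60) 2 - 12 * 60), ct)
          | some b => if pyabs (PySem.Int.floordiv (ct + 22 * 60) 2 - 12 * 60) < b.1 then
              some (pyabs (PySem.Int.floordiv (ct + 22 * 60) 2 - 12 * 60), ct) else some b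
         else (G.filter (fun g => decide (g.2 - g.1 ≥ duration))).foldl pvMStep none) with
       | some b => b.2
       | none => (12 * 60 : Int)) := by
  rw [pvTrail]
  exact pvMatch (pvSuit duration ct G)

-- ===== VERDICT (by name: the statement is the Claim_ definition above) =====
theorem find_best_available_gap_py_spec : Claim_equal_find_best_available_gap_py := by
  intro blocks duration _
  unfold Spec_find_best_available_gap_py find_best_available_gap_py
    find_best_available_gap_py_alt extract_gaps_in_range
  simp only [pvA_fold, pvB_fold, List.nil_append]
  exact pvFinal duration
    (pvCT (6 * 60) (PySem.List.sorted
      ((blocks.filter (fun b => decide (b.1 < 22 * 60) && decide (b.2.1 > 6 * 60))).map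
        (fun b => (b.1, b.2.1))) (fun t => t.1)))
    (pvG (6 * 60) (PySem.List.sorted
      ((blocks.filter (fun b => decide (b.1 < 22 * 60) && decide (b.2.1 > 6 * 60))).map
        (fun b => (b.1, b.2.1))) (fun t => t.1)))
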